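-- pv_equiv track=rewrite | github.com/HannaZhuravskaya/adventofcode-2023 | src/10.1.py | getCycleLength
-- ===== SOURCE A (Python) =====
-- pipes = {'|': [(1, 0), (-1, 0)], '-': [(0, 1), (0, -1)], 'L': [(-1, 0), (0, 1)],
--          'J': [(-1, 0), (0, -1)], '7': [(1, 0), (0, -1)], 'F': [(1, 0), (0, 1)]}
--
-- def getNextStep(lines, prevStep, curStep, n, m):
--     if curStep[0] < 0 or curStep[0] >= n or curStep[1] < 0 or curStep[1] >= m:
--         return (-1, -1)
--
--     if lines[curStep[0]][curStep[1]] == '.':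
--         return (-1, -1)
--
--     pipe = lines[curStep[0]][curStep[1]]
--     directions = pipes[pipe]
--     firstPossibleStep = (curStep[0] + directions[0][0], curStep[1] + directions[0][1])
--     secondPossibleStep = (curStep[0] + directions[1][0], curStep[1] + directions[1][1])
--
--     if prevStep == firstPossibleStep:
--         return secondPossibleStep
--     elif prevStep == secondPossibleStep:
--         return firstPossibleStep
--     else:
--         return (-1, -1)
--
-- def getCycleLength(lines, startPos, direction, n, m):
--     prevStep = startPos
--     curStep = (startPos[0] + direction[0], startPos[1] + direction[1])
--     steps = 1
--
--     if curStep[0] < 0 or curStep[0] >= n or curStep[1] < 0 or curStep[1] >= m: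
--         return -1
--
--     while lines[curStep[0]][curStep[1]] != 'S':
--         nextStep = getNextStep(lines, prevStep, curStep, n, m)
--
--         if nextStep == (-1, -1):
--             return -1
--
--         prevStep = curStep
--         curStep = nextStep
--         steps += 1
--
--     return steps
-- ===== SOURCE B (Python) =====
-- # B: compile the grid into an explicit automaton first (a set of 'S' cells plus a
-- # transition dict over (row, col, heading) states), then the walk is pure dict iteration
-- # with no grid access, glyph logic or coordinate comparison per step.
--
-- _DIRS = [(-1, 0), (1, 0), (0, -1), (0, 1)]   # heading slots: 0=up 1=down 2=left 3=right
-- _OPP = [1, 0, 3, 2]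
-- # each pipe glyph's two connection slots (same order as A's `pipes` table)
-- _ENDS = {'|': (1, 0), '-': (3, 2), 'L': (0, 3), 'J': (0, 2), '7': (1, 2), 'F': (1, 3)}
--
-- def _compile(lines, n, m):
--     """One pass over the grid: the set of 'S' cells and the state-transition dict.
--     State (i, j, d) = standing on cell (i, j) having travelled with heading slot d;
--     trans maps it to the next state, absent = the walk dies there."""
--     sCells = set()
--     trans = {}
--     for i, row in enumerate(lines):
--         if i >= n:
--             break
--         for j, c in enumerate(row):
--             if j >= m:
--                 break
--             if c == 'S':
--                 sCells.add((i, j))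
--             elif c in _ENDS:
--                 a, b = _ENDS[c]
--                 for entry, exit_ in ((_OPP[a], b), (_OPP[b], a)):
--                     ey, ex = i + _DIRS[exit_][0], j + _DIRS[exit_][1]
--                     if 0 <= ey < n and 0 <= ex < m:
--                         trans[(i, j, entry)] = (ey, ex, exit_)
--     return sCells, trans
--
-- def getCycleLength(lines, startPos, direction, n, m):
--     y, x = startPos[0] + direction[0], startPos[1] + direction[1]
--     if not (0 <= y < n and 0 <= x < m):
--         return -1
--     sCells, trans = _compile(lines, n, m)
--     dd = (direction[0], direction[1])
--     d = _DIRS.index(dd) if dd in _DIRS else 4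
--     state = (y, x, d)
--     steps = 1
--     while True:
--         if (state[0], state[1]) in sCells:
--             return steps
--         state = trans.get(state)
--         if state is None:
--             return -1
--         steps += 1
-- ===== Notes on version B (the rewrite author's own statement) =====
-- stated objective: alternative
-- what changed: B compiles the whole grid into an explicit automaton first (a set of 'S' cells plus a dict from (row,col,heading) states to successor states, built in one pass over the grid), and the walk is then pure dict iteration with no grid access, glyph logic or neighbour-cell comparison per step; A instead re-reads glyphs and compares candidate neighbour cells at every step.
-- outside the precondition, e.g. on getCycleLength(['|', 'S'], (1, 0), (-1, 0), 2, 1): A returns 2, B returns -1; on getCycleLength(['S|'], (0, 0), (0, 1), 1, 2): A returns -1, B returns -1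
import Mathlib
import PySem

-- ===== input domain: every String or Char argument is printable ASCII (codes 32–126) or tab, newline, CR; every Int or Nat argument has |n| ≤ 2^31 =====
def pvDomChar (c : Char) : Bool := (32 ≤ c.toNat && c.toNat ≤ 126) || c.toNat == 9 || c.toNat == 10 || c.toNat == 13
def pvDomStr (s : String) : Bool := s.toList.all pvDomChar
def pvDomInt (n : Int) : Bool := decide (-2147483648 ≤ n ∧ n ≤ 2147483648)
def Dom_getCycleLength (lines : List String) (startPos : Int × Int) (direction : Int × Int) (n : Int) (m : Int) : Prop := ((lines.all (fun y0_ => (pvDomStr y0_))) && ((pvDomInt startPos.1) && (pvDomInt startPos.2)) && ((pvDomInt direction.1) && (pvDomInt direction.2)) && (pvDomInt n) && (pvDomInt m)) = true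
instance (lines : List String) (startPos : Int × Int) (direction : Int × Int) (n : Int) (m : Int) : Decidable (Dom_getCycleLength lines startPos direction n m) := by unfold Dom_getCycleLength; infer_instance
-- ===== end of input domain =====

-- B first COMPILES the grid into an explicit automaton (a set of 'S' cells and a state-transition
-- dict over (row, col, heading) states) in a preprocessing pass, then the walk is pure dict
-- iteration; A instead reads glyphs and compares candidate neighbour cells at every step
-- (objective: alternative; same asymptotic cost).

-- Shared cell accessor: lines[i][j]; '?' stands for the IndexError case, which Pre_ excludes.
def cellRead? (lines : List String) (i j : Int) : Option Char :=
  (PySem.List.pyGet? lines i).bind (fun r => PySem.Str.pyGet? r j)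

def cellAt (lines : List String) (i j : Int) : Char := (cellRead? lines i j).getD '?'

-- Fuel bound for both loops: within Pre_ the Python loops return well before it is exhausted.
def pvFuel (n m : Int) : Nat := (n.toNat + 2) * (m.toNat + 2) * 5 + 8

-- ===== PORT A =====
-- the module-level dict `pipes`
def pipesDict : PySem.Dict Char (List (Int × Int)) :=
  PySem.Dict.mk
  [('|', [(1, 0), (-1, 0)]), ('-', [(0, 1), (0, -1)]), ('L', [(-1, 0), (0, 1)]),
   ('J', [(-1, 0), (0, -1)]), ('7', [(1, 0), (0, -1)]), ('F', [(1, 0), (0, 1)])]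

def getNextStep (lines : List String) (prevStep curStep : Int × Int) (n m : Int) : Int × Int :=
  if curStep.1 < 0 ∨ n ≤ curStep.1 ∨ curStep.2 < 0 ∨ m ≤ curStep.2 then (-1, -1)
  else if cellAt lines curStep.1 curStep.2 = '.' then (-1, -1)
  else
    match PySem.Dict.get? pipesDict (cellAt lines curStep.1 curStep.2) with
    | none => (-1, -1)   -- Python raises KeyError here; Pre_ excludes it
    | some dirs =>
      let d0 := (PySem.List.pyGet? dirs 0).getD (0, 0)
      let d1 := (PySem.List.pyGet? dirs 1).getD (0, 0)
      let first := (curStep.1 + d0.1, curStep.2 + d0.2)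
      let second := (curStep.1 + d1.1, curStep.2 + d1.2)
      if prevStep = first then second
      else if prevStep = second then first
      else (-1, -1)

def loopA (lines : List String) (n m : Int) : Nat → (Int × Int) → (Int × Int) → Int → Int
  | 0, _, _, _ => -1
  | fuel + 1, prev, cur, steps =>
    if cellAt lines cur.1 cur.2 ≠ 'S' then
      let next := getNextStep lines prev cur n m
      if next = (-1, -1) then -1
      else loopA lines n m fuel cur next (steps + 1)
    else steps

def getCycleLength (lines : List String) (startPos : Int × Int) (direction : Int × Int) (n : Int) (m : Int) : Int :=
  let cur := (startPos.1 + direction.1, startPos.2 + direction.2)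
  if cur.1 < 0 ∨ n ≤ cur.1 ∨ cur.2 < 0 ∨ m ≤ cur.2 then -1
  else loopA lines n m (pvFuel n m) startPos cur 1

-- ===== PORT B =====
-- heading slots: 0 = up, 1 = down, 2 = left, 3 = right (Python _DIRS / _OPP / _ENDS)
def dirsB : List (Int × Int) := [(-1, 0), (1, 0), (0, -1), (0, 1)]
def oppB : List Nat := [1, 0, 3, 2]

def endsB (c : Char) : Option (Nat × Nat) :=
  if c = '|' then some (1, 0) else if c = '-' then some (3, 2)
  else if c = 'L' then some (0, 3) else if c = 'J' then some (0, 2)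
  else if c = '7' then some (1, 2) else if c = 'F' then some (1, 3) else none

-- one grid cell's contribution to the automaton (body of Python's inner loop)
def compileCell (n m i j : Int) (c : Char)
    (acc : PySem.Set (Int × Int) × PySem.Dict (Int × Int × Int) (Int × Int × Int)) :
    PySem.Set (Int × Int) × PySem.Dict (Int × Int × Int) (Int × Int × Int) :=
  if c = 'S' then (PySem.Set.add acc.1 (i, j), acc.2)
  else
    match endsB c with
    | none => acc
    | some (a, b) =>
      [(oppB.getD a 0, b), (oppB.getD b 0, a)].foldl (fun ac pe =>
        let e := dirsB.getD pe.2 (0, 0)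
        let ey := i + e.1
        let ex := j + e.2
        if 0 ≤ ey ∧ ey < n ∧ 0 ≤ ex ∧ ex < m then
          (ac.1, ac.2.insert (i, j, (pe.1 : Int)) (ey, ex, (pe.2 : Int)))
        else ac) acc

def compileRow (n m i : Int) : List Char → Int →
    PySem.Set (Int × Int) × PySem.Dict (Int × Int × Int) (Int × Int × Int) →
    PySem.Set (Int × Int) × PySem.Dict (Int × Int × Int) (Int × Int × Int)
  | [], _, acc => acc
  | c :: rest, j, acc =>
    if m ≤ j then acc      -- Python's `break` on j >= m
    else compileRow n m i rest (j + 1) (compileCell n m i j c acc)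

def compileRows (n m : Int) : List String → Int →
    PySem.Set (Int × Int) × PySem.Dict (Int × Int × Int) (Int × Int × Int) →
    PySem.Set (Int × Int) × PySem.Dict (Int × Int × Int) (Int × Int × Int)
  | [], _, acc => acc
  | row :: rest, i, acc =>
    if n ≤ i then acc      -- Python's `break` on i >= n
    else compileRows n m rest (i + 1) (compileRow n m i row.toList 0 acc)

-- Python _compile
def compileB (lines : List String) (n m : Int) :
    PySem.Set (Int × Int) × PySem.Dict (Int × Int × Int) (Int × Int × Int) :=
  compileRows n m lines 0 (PySem.Set.empty, PySem.Dict.empty)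

-- `_DIRS.index(dd) if dd in _DIRS else 4`
def slotOf (t : Int × Int) : Int :=
  match PySem.List.index? dirsB t with
  | some k => (k : Int)
  | none => 4

def loopB (sC : PySem.Set (Int × Int)) (tr : PySem.Dict (Int × Int × Int) (Int × Int × Int)) :
    Nat → (Int × Int × Int) → Int → Int
  | 0, _, _ => -1
  | fuel + 1, st, steps =>
    if PySem.Set.contains sC (st.1, st.2.1) then steps
    else
      match PySem.Dict.get? tr st with
      | none => -1
      | some st' => loopB sC tr fuel st' (steps + 1)

def getCycleLength_alt (lines : List String) (startPos : Int × Int) (direction : Int × Int) (n : Int) (m : Int) : Int :=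
  let y := startPos.1 + direction.1
  let x := startPos.2 + direction.2
  if ¬ (0 ≤ y ∧ y < n ∧ 0 ≤ x ∧ x < m) then -1
  else
    let auto := compileB lines n m
    loopB auto.1 auto.2 (pvFuel n m) (y, x, slotOf direction) 1

-- ===== PRECONDITION & SPEC =====
def validChars : List Char := ['|', '-', 'L', 'J', '7', 'F', '.', 'S']

def connOf (c : Char) : List (Int × Int) := (PySem.Dict.get? pipesDict c).getD []

-- a well-formed puzzle grid: n×m rows of pipe/'.'/'S' cells, no pipe connection leaving the grid
def GoodGrid (lines : List String) (n m : Int) : Prop :=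
  (lines.length : Int) = n ∧ 0 < m ∧
  (∀ i : Nat, i < lines.length →
    ((lines.getD i "").toList.length : Int) = m ∧
    ∀ j : Nat, j < (lines.getD i "").toList.length →
      (lines.getD i "").toList.getD j '?' ∈ validChars ∧
      ∀ e ∈ connOf ((lines.getD i "").toList.getD j '?'),
        0 ≤ (i : Int) + e.1 ∧ (i : Int) + e.1 < n ∧ 0 ≤ (j : Int) + e.2 ∧ (j : Int) + e.2 < m)

-- Pre_ admits: a first step off the board (A returns -1 at once), a first cell that is '.' or 'S'
-- (A returns at once), or a well-formed grid with 'S' at startPos.  Outside these, A may raise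
-- IndexError (walk leaves the grid / short row), raise KeyError (non-pipe glyph), read through
-- Python's negative-index wraparound, or loop forever (a closed pipe cycle with no 'S'); which cells
-- the walk visits is not expressible in closed form, so the grid-shaped conditions are per-cell.
def Pre_getCycleLength (lines : List String) (startPos : Int × Int) (direction : Int × Int) (n : Int) (m : Int) : Prop :=
  let cur := (startPos.1 + direction.1, startPos.2 + direction.2)
  (cur.1 < 0 ∨ n ≤ cur.1 ∨ cur.2 < 0 ∨ m ≤ cur.2)
  ∨ (0 ≤ cur.1 ∧ cur.1 < n ∧ 0 ≤ cur.2 ∧ cur.2 < m ∧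
      (cellRead? lines cur.1 cur.2 = some '.' ∨ cellRead? lines cur.1 cur.2 = some 'S'))
  ∨ (GoodGrid lines n m ∧ 0 ≤ startPos.1 ∧ startPos.1 < n ∧ 0 ≤ startPos.2 ∧ startPos.2 < m ∧
      cellRead? lines startPos.1 startPos.2 = some 'S')

instance (lines : List String) (startPos : Int × Int) (direction : Int × Int) (n : Int) (m : Int) : Decidable (Pre_getCycleLength lines startPos direction n m) := by
  unfold Pre_getCycleLength GoodGrid; infer_instance

def pvWitness_getCycleLength : List String × (Int × Int) × (Int × Int) × Int × Int :=
  (["S7", "LJ"], (0, 0), (1, 0), 2, 2)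

def Spec_getCycleLength (lines : List String) (startPos : Int × Int) (direction : Int × Int) (n : Int) (m : Int) (out : Int) : Prop := out = getCycleLength_alt lines startPos direction n m
instance (lines : List String) (startPos : Int × Int) (direction : Int × Int) (n : Int) (m : Int) (out : Int) : Decidable (Spec_getCycleLength lines startPos direction n m out) := by unfold Spec_getCycleLength; infer_instance

-- ===== CLAIM (what is proved, stated in full; the proofs are below) =====
def Claim_equal_getCycleLength : Prop := ∀ (lines : List String) (startPos : Int × Int) (direction : Int × Int) (n : Int) (m : Int), Dom_getCycleLength lines startPos direction n m → Pre_getCycleLength lines startPos direction n m → Spec_getCycleLength lines startPos direction n m (getCycleLength lines startPos direction n m)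

-- ===== LEMMAS AND PROOFS =====

-- what the compiled dict holds for one cell: the exit (if in bounds) for each valid entry heading
def exitOpt (n m i j : Int) (s : Nat) : Option (Int × Int × Int) :=
  let e := dirsB.getD s (0, 0)
  if 0 ≤ i + e.1 ∧ i + e.1 < n ∧ 0 ≤ j + e.2 ∧ j + e.2 < m then
    some (i + e.1, j + e.2, (s : Int))
  else none

def cellTrans (n m i j : Int) (c : Char) (d : Int) : Option (Int × Int × Int) :=
  match endsB c with
  | none => none
  | some (a, b) =>
    if d = ((oppB.getD a 0 : Nat) : Int) then exitOpt n m i j b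
    else if d = ((oppB.getD b 0 : Nat) : Int) then exitOpt n m i j a
    else none

lemma compileCell_fst_mem (n m i j : Int) (c : Char) (acc) (p : Int × Int) :
    p ∈ (compileCell n m i j c acc).1 ↔ p ∈ acc.1 ∨ (c = 'S' ∧ p = (i, j)) := by
  unfold compileCell
  by_cases hc : c = 'S'
  · simp [hc, PySem.Set.mem_add]
  · rcases he : endsB c with _ | ⟨a, b⟩ <;>
      simp only [if_neg hc, List.foldl] <;>
      [skip; split_ifs] <;> simp [hc]

set_option maxHeartbeats 1000000 in
lemma compileCell_snd_get?_pipe (n m i j : Int) {c : Char} {a b : Nat}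
    (hc : c ≠ 'S') (he : endsB c = some (a, b))
    (hne : ((oppB.getD a 0 : Nat) : Int) ≠ ((oppB.getD b 0 : Nat) : Int))
    (acc) (k : Int × Int × Int) :
    ((compileCell n m i j c acc).2).get? k =
      (if k.1 = i ∧ k.2.1 = j then cellTrans n m i j c k.2.2 else none).or (acc.2.get? k) := by
  obtain ⟨k1, k2, k3⟩ := k
  have hKa : ((i, j, ((oppB.getD a 0 : Nat) : Int)) = ((k1, k2, k3) : Int × Int × Int)) ↔
      (k1 = i ∧ k2 = j ∧ k3 = ((oppB.getD a 0 : Nat) : Int)) := by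
    constructor <;> (intro h; simp_all [Prod.ext_iff])  -- keys as triples
  have hKb : ((i, j, ((oppB.getD b 0 : Nat) : Int)) = ((k1, k2, k3) : Int × Int × Int)) ↔
      (k1 = i ∧ k2 = j ∧ k3 = ((oppB.getD b 0 : Nat) : Int)) := by
    constructor <;> (intro h; simp_all [Prod.ext_iff])  -- keys as triples
  unfold compileCell cellTrans exitOpt
  simp only [if_neg hc, he, List.foldl]
  by_cases h1 : k1 = i ∧ k2 = j
  · obtain ⟨rfl, rfl⟩ := h1
    by_cases ha : k3 = ((oppB.getD a 0 : Nat) : Int)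
    · subst ha
      split_ifs <;> simp_all [PySem.Dict.get?_insert, Prod.ext_iff, Option.or]
    · by_cases hb2 : k3 = ((oppB.getD b 0 : Nat) : Int)
      · subst hb2
        split_ifs <;> simp_all [PySem.Dict.get?_insert, Prod.ext_iff, Option.or]
      · split_ifs <;> simp_all [PySem.Dict.get?_insert, Prod.ext_iff, Option.or]
  · split_ifs <;> simp_all [PySem.Dict.get?_insert, Prod.ext_iff, Option.or] ;
      (rw [if_neg, if_neg] <;> rintro ⟨rfl, rfl, -⟩ <;> simp_all)

lemma compileCell_snd_get? (n m i j : Int) (c : Char) (acc) (k : Int × Int × Int) :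
    ((compileCell n m i j c acc).2).get? k =
      (if k.1 = i ∧ k.2.1 = j then cellTrans n m i j c k.2.2 else none).or (acc.2.get? k) := by
  by_cases hb : c = '|';  · exact compileCell_snd_get?_pipe (a := 1) (b := 0) n m i j (by simp [hb]) (by simp [hb, endsB]) (by decide) acc k
  by_cases hd : c = '-';  · exact compileCell_snd_get?_pipe (a := 3) (b := 2) n m i j (by simp [hd]) (by simp [hd, endsB]) (by decide) acc k
  by_cases hL : c = 'L';  · exact compileCell_snd_get?_pipe (a := 0) (b := 3) n m i j (by simp [hL]) (by simp [hL, endsB]) (by decide) acc k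
  by_cases hJ : c = 'J';  · exact compileCell_snd_get?_pipe (a := 0) (b := 2) n m i j (by simp [hJ]) (by simp [hJ, endsB]) (by decide) acc k
  by_cases h7 : c = '7';  · exact compileCell_snd_get?_pipe (a := 1) (b := 2) n m i j (by simp [h7]) (by simp [h7, endsB]) (by decide) acc k
  by_cases hF : c = 'F';  · exact compileCell_snd_get?_pipe (a := 1) (b := 3) n m i j (by simp [hF]) (by simp [hF, endsB]) (by decide) acc k
  -- remaining characters contribute nothing to the dict
  have he : endsB c = none := by simp [endsB, hb, hd, hL, hJ, h7, hF]
  unfold compileCell cellTrans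
  by_cases hc : c = 'S'
  · subst hc; simp [he]
  · simp [hc, he]

lemma compileRow_fst_mem (n m i : Int) (cs : List Char) (j0 : Int) (acc) (p : Int × Int) :
    p ∈ (compileRow n m i cs j0 acc).1 ↔
      p ∈ acc.1 ∨ ∃ t : Nat, t < cs.length ∧ j0 + (t : Int) < m ∧ p = (i, j0 + (t : Int)) ∧
        cs.getD t '?' = 'S' := by
  induction cs generalizing j0 acc with
  | nil => simp [compileRow]
  | cons c rest ih =>
    simp only [compileRow]
    by_cases hm : m ≤ j0
    · rw [if_pos hm]
      constructor
      · exact fun h => Or.inl h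
      · rintro (h | ⟨t, -, hlt, -, -⟩); · exact h
        omega
    · rw [if_neg hm, ih]
      rw [compileCell_fst_mem]
      constructor
      · rintro ((h | ⟨hcS, rfl⟩) | ⟨t, ht, hlt, rfl, hS⟩)
        · exact Or.inl h
        · exact Or.inr ⟨0, by simp, by omega, by simp, by simpa using hcS⟩
        · refine Or.inr ⟨t + 1, by simpa using ht, by push_cast; omega, by push_cast; ring_nf, by simpa using hS⟩
      · rintro (h | ⟨t, ht, hlt, rfl, hS⟩)
        · exact Or.inl (Or.inl h)
        · cases t with
          | zero => exact Or.inl (Or.inr ⟨by simpa using hS, by simp⟩)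
          | succ t' =>
            refine Or.inr ⟨t', by simpa using ht, by push_cast at hlt ⊢; omega, by push_cast; ring_nf, by simpa using hS⟩

lemma compileRow_snd_get? (n m i : Int) (cs : List Char) (j0 : Int) (acc) (k : Int × Int × Int) :
    ((compileRow n m i cs j0 acc).2).get? k =
      (if k.1 = i ∧ j0 ≤ k.2.1 ∧ k.2.1 - j0 < (cs.length : Int) ∧ k.2.1 < m then
        cellTrans n m i k.2.1 (cs.getD (k.2.1 - j0).toNat '?') k.2.2 else none).or
      (acc.2.get? k) := by
  induction cs generalizing j0 acc with
  | nil =>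
    have hno : ¬(k.1 = i ∧ j0 ≤ k.2.1 ∧ k.2.1 - j0 < (([] : List Char).length : Int) ∧ k.2.1 < m) := by
      rintro ⟨-, h1, h2, -⟩; simp at h2; omega
    simp only [compileRow, if_neg hno, Option.none_or]
  | cons c rest ih =>
    simp only [compileRow]
    by_cases hm : m ≤ j0
    · have hno : ¬(k.1 = i ∧ j0 ≤ k.2.1 ∧ k.2.1 - j0 < ((c :: rest).length : Int) ∧ k.2.1 < m) := by
        rintro ⟨-, h1, -, h2⟩; omega
      rw [if_pos hm, if_neg hno, Option.none_or]
    · rw [if_neg hm, ih, compileCell_snd_get?, ← Option.or_assoc]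
      congr 1
      by_cases hki : k.1 = i
      · by_cases heq : k.2.1 = j0
        · have h1 : ¬(k.1 = i ∧ j0 + 1 ≤ k.2.1 ∧ k.2.1 - (j0 + 1) < (rest.length : Int) ∧ k.2.1 < m) := by
            rintro ⟨-, h, -, -⟩; omega
          have h2 : k.1 = i ∧ j0 ≤ k.2.1 ∧ k.2.1 - j0 < ((c :: rest).length : Int) ∧ k.2.1 < m := by
            refine ⟨hki, by omega, by simp; omega, by omega⟩
          rw [if_neg h1, if_pos h2, if_pos ⟨hki, heq⟩, Option.none_or]
          have : (k.2.1 - j0).toNat = 0 := by omega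
          rw [this, heq]
          simp
        · have hC : (if k.1 = i ∧ k.2.1 = j0 then cellTrans n m i j0 c k.2.2 else none) = none :=
            if_neg (by rintro ⟨-, h⟩; exact heq h)
          rw [hC, Option.or_none]
          by_cases hge : j0 + 1 ≤ k.2.1 ∧ k.2.1 < m ∧ k.2.1 - j0 < ((c :: rest).length : Int)
          · have h1 : k.1 = i ∧ j0 + 1 ≤ k.2.1 ∧ k.2.1 - (j0 + 1) < (rest.length : Int) := by
              refine ⟨hki, hge.1, by have := hge.2.2; simp at this ⊢; omega⟩
            have h2 : k.1 = i ∧ j0 ≤ k.2.1 ∧ k.2.1 - j0 < ((c :: rest).length : Int) ∧ k.2.1 < m :=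
              ⟨hki, by omega, hge.2.2, hge.2.1⟩
            rw [if_pos ⟨h1.1, h1.2.1, h1.2.2, hge.2.1⟩, if_pos h2]
            have hnt : (k.2.1 - j0).toNat = (k.2.1 - (j0 + 1)).toNat + 1 := by omega
            rw [hnt]
            simp
          · have h1 : ¬(k.1 = i ∧ j0 + 1 ≤ k.2.1 ∧ k.2.1 - (j0 + 1) < (rest.length : Int) ∧ k.2.1 < m) := by
              rintro ⟨-, ha, hb, hc⟩
              exact hge ⟨ha, hc, by simp at hb ⊢; omega⟩
            have h2 : ¬(k.1 = i ∧ j0 ≤ k.2.1 ∧ k.2.1 - j0 < ((c :: rest).length : Int) ∧ k.2.1 < m) := by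
              rintro ⟨-, ha, hb, hc⟩
              exact hge ⟨by omega, hc, hb⟩
            rw [if_neg h1, if_neg h2]
      · rw [if_neg (fun h => hki h.1), if_neg (fun h => hki h.1), if_neg (fun h => hki h.1)]
        simp

lemma compileRows_fst_mem (n m : Int) (rows : List String) (i0 : Int) (acc) (p : Int × Int) :
    p ∈ (compileRows n m rows i0 acc).1 ↔
      p ∈ acc.1 ∨ ∃ t : Nat, t < rows.length ∧ i0 + (t : Int) < n ∧ p.1 = i0 + (t : Int) ∧
        0 ≤ p.2 ∧ p.2 < m ∧ p.2 < ((rows.getD t "").toList.length : Int) ∧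
        (rows.getD t "").toList.getD p.2.toNat '?' = 'S' := by
  induction rows generalizing i0 acc with
  | nil => simp [compileRows]
  | cons row rest ih =>
    simp only [compileRows]
    by_cases hn : n ≤ i0
    · rw [if_pos hn]
      constructor
      · exact fun h => Or.inl h
      · rintro (h | ⟨t, -, hlt, -⟩); · exact h
        omega
    · rw [if_neg hn, ih, compileRow_fst_mem]
      constructor
      · rintro ((h | ⟨s, hs, hsm, rfl, hS⟩) | ⟨t, ht, htn, hp1, hp2, hpm, hplen, hS⟩)
        · exact Or.inl h
        · refine Or.inr ⟨0, by simp, by omega, by simp, by simp, by simpa using hsm, ?_, ?_⟩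
          · simp only [List.getD_cons_zero]
            simpa using hs
          · simp only [List.getD_cons_zero, zero_add, Int.toNat_natCast]
            exact hS
        · refine Or.inr ⟨t + 1, by simpa using ht, by push_cast; omega, by push_cast; omega,
            hp2, hpm, by simpa using hplen, by simpa using hS⟩
      · rintro (h | ⟨t, ht, htn, hp1, hp2, hpm, hplen, hS⟩)
        · exact Or.inl (Or.inl h)
        · cases t with
          | zero =>
            refine Or.inl (Or.inr ⟨p.2.toNat, by simp only [List.getD_cons_zero] at hplen; omega,
              by simp; omega, ?_, by simpa using hS⟩)
            simp at hp1
            exact Prod.ext hp1 (by omega)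
          | succ t' =>
            refine Or.inr ⟨t', by simpa using ht, by push_cast at htn ⊢; omega,
              by push_cast at hp1 ⊢; omega, hp2, hpm, by simpa using hplen, by simpa using hS⟩

lemma compileRows_snd_get? (n m : Int) (rows : List String) (i0 : Int) (acc) (k : Int × Int × Int) :
    ((compileRows n m rows i0 acc).2).get? k =
      (if i0 ≤ k.1 ∧ k.1 - i0 < (rows.length : Int) ∧ k.1 < n ∧ 0 ≤ k.2.1 ∧
          k.2.1 < ((rows.getD (k.1 - i0).toNat "").toList.length : Int) ∧ k.2.1 < m then
        cellTrans n m k.1 k.2.1 ((rows.getD (k.1 - i0).toNat "").toList.getD k.2.1.toNat '?') k.2.2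
      else none).or (acc.2.get? k) := by
  induction rows generalizing i0 acc with
  | nil =>
    have hno : ¬(i0 ≤ k.1 ∧ k.1 - i0 < (([] : List String).length : Int) ∧ k.1 < n ∧ 0 ≤ k.2.1 ∧
        k.2.1 < ((([] : List String).getD (k.1 - i0).toNat "").toList.length : Int) ∧ k.2.1 < m) := by
      rintro ⟨h1, h2, -⟩; simp at h2; omega
    simp only [compileRows, if_neg hno, Option.none_or]
  | cons row rest ih =>
    simp only [compileRows]
    by_cases hn : n ≤ i0
    · have hno : ¬(i0 ≤ k.1 ∧ k.1 - i0 < (((row :: rest) : List String).length : Int) ∧ k.1 < n ∧ 0 ≤ k.2.1 ∧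
          k.2.1 < (((row :: rest).getD (k.1 - i0).toNat "").toList.length : Int) ∧ k.2.1 < m) := by
        rintro ⟨h1, -, h2, -⟩; omega
      rw [if_pos hn, if_neg hno, Option.none_or]
    · rw [if_neg hn, ih, compileRow_snd_get?, ← Option.or_assoc]
      congr 1
      by_cases heq : k.1 = i0
      · have h1 : ¬(i0 + 1 ≤ k.1 ∧ k.1 - (i0 + 1) < (rest.length : Int) ∧ k.1 < n ∧ 0 ≤ k.2.1 ∧
            k.2.1 < ((rest.getD (k.1 - (i0 + 1)).toNat "").toList.length : Int) ∧ k.2.1 < m) := by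
          rintro ⟨h, -⟩; omega
        rw [if_neg h1, Option.none_or]
        have ht0 : (k.1 - i0).toNat = 0 := by omega
        by_cases h2 : k.1 = i0 ∧ 0 ≤ k.2.1 ∧ k.2.1 - 0 < (row.toList.length : Int) ∧ k.2.1 < m
        · have h3 : i0 ≤ k.1 ∧ k.1 - i0 < (((row :: rest) : List String).length : Int) ∧ k.1 < n ∧ 0 ≤ k.2.1 ∧
              k.2.1 < (((row :: rest).getD (k.1 - i0).toNat "").toList.length : Int) ∧ k.2.1 < m := by
            rw [ht0]
            refine ⟨by omega, by simp; omega, by omega, h2.2.1, by simpa using h2.2.2.1, h2.2.2.2⟩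
          rw [if_pos h2, if_pos h3, ht0, heq]
          simp
        · have h3 : ¬(i0 ≤ k.1 ∧ k.1 - i0 < (((row :: rest) : List String).length : Int) ∧ k.1 < n ∧ 0 ≤ k.2.1 ∧
              k.2.1 < (((row :: rest).getD (k.1 - i0).toNat "").toList.length : Int) ∧ k.2.1 < m) := by
            rw [ht0]
            rintro ⟨-, -, -, ha, hb, hc⟩
            exact h2 ⟨heq, ha, by simpa using hb, hc⟩
          rw [if_neg h3]
          have hC : (if k.1 = i0 ∧ 0 ≤ k.2.1 ∧ k.2.1 - 0 < (row.toList.length : Int) ∧ k.2.1 < m then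
              cellTrans n m i0 k.2.1 (row.toList.getD (k.2.1 - 0).toNat '?') k.2.2 else none) = none :=
            if_neg h2
          rw [hC]
      · have hC : (if k.1 = i0 ∧ 0 ≤ k.2.1 ∧ k.2.1 - 0 < (row.toList.length : Int) ∧ k.2.1 < m then
            cellTrans n m i0 k.2.1 (row.toList.getD (k.2.1 - 0).toNat '?') k.2.2 else none) = none :=
          if_neg (by rintro ⟨h, -⟩; exact heq h)
        rw [hC, Option.or_none]
        by_cases hge : i0 + 1 ≤ k.1 ∧ k.1 - i0 < (((row :: rest) : List String).length : Int) ∧ k.1 < n ∧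
            0 ≤ k.2.1 ∧ k.2.1 < (((row :: rest).getD (k.1 - i0).toNat "").toList.length : Int) ∧ k.2.1 < m
        · have hnt : (k.1 - i0).toNat = (k.1 - (i0 + 1)).toNat + 1 := by omega
          have h1 : i0 + 1 ≤ k.1 ∧ k.1 - (i0 + 1) < (rest.length : Int) ∧ k.1 < n ∧ 0 ≤ k.2.1 ∧
              k.2.1 < ((rest.getD (k.1 - (i0 + 1)).toNat "").toList.length : Int) ∧ k.2.1 < m := by
            obtain ⟨ha, hb, hc, hd, he2, hf⟩ := hge
            rw [hnt] at he2
            refine ⟨ha, by simp at hb ⊢; omega, hc, hd, by simpa using he2, hf⟩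
          have h2 : i0 ≤ k.1 ∧ k.1 - i0 < (((row :: rest) : List String).length : Int) ∧ k.1 < n ∧
              0 ≤ k.2.1 ∧ k.2.1 < (((row :: rest).getD (k.1 - i0).toNat "").toList.length : Int) ∧ k.2.1 < m :=
            ⟨by omega, hge.2.1, hge.2.2.1, hge.2.2.2.1, hge.2.2.2.2.1, hge.2.2.2.2.2⟩
          rw [if_pos h1, if_pos h2, hnt]
          simp
        · have h1 : ¬(i0 + 1 ≤ k.1 ∧ k.1 - (i0 + 1) < (rest.length : Int) ∧ k.1 < n ∧ 0 ≤ k.2.1 ∧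
              k.2.1 < ((rest.getD (k.1 - (i0 + 1)).toNat "").toList.length : Int) ∧ k.2.1 < m) := by
            rintro ⟨ha, hb, hc, hd, he2, hf⟩
            have hnt : (k.1 - i0).toNat = (k.1 - (i0 + 1)).toNat + 1 := by omega
            exact hge ⟨ha, by simp at hb ⊢; omega, hc, hd, by rw [hnt]; simpa using he2, hf⟩
          have h2 : ¬(i0 ≤ k.1 ∧ k.1 - i0 < (((row :: rest) : List String).length : Int) ∧ k.1 < n ∧
              0 ≤ k.2.1 ∧ k.2.1 < (((row :: rest).getD (k.1 - i0).toNat "").toList.length : Int) ∧ k.2.1 < m) := by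
            rintro ⟨ha, hb, hc, hd, he2, hf⟩
            exact hge ⟨by omega, hb, hc, hd, he2, hf⟩
          rw [if_neg h1, if_neg h2]

-- final characterizations of the compiled automaton
lemma compileB_fst_mem (lines : List String) (n m : Int) (p : Int × Int) :
    p ∈ (compileB lines n m).1 ↔
      0 ≤ p.1 ∧ p.1 < n ∧ p.1 < (lines.length : Int) ∧ 0 ≤ p.2 ∧ p.2 < m ∧
      p.2 < ((lines.getD p.1.toNat "").toList.length : Int) ∧
      (lines.getD p.1.toNat "").toList.getD p.2.toNat '?' = 'S' := by
  unfold compileB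
  rw [compileRows_fst_mem]
  constructor
  · rintro (h | ⟨t, ht, htn, hp1, hp2, hpm, hplen, hS⟩)
    · cases h
    · have htt : p.1.toNat = t := by omega
      refine ⟨by omega, by omega, by omega, hp2, hpm, by rw [htt]; exact hplen, by rw [htt]; exact hS⟩
  · rintro ⟨h1, h2, h3, h4, h5, h6, h7⟩
    exact Or.inr ⟨p.1.toNat, by omega, by omega, by omega, h4, h5, h6, h7⟩

lemma compileB_snd_get? (lines : List String) (n m : Int) (k : Int × Int × Int) :
    ((compileB lines n m).2).get? k =
      if 0 ≤ k.1 ∧ k.1 < n ∧ k.1 < (lines.length : Int) ∧ 0 ≤ k.2.1 ∧ k.2.1 < m ∧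
          k.2.1 < ((lines.getD k.1.toNat "").toList.length : Int) then
        cellTrans n m k.1 k.2.1 ((lines.getD k.1.toNat "").toList.getD k.2.1.toNat '?') k.2.2
      else none := by
  unfold compileB
  rw [compileRows_snd_get?]
  have hz : k.1 - 0 = k.1 := by ring
  rw [hz]
  simp only [PySem.Dict.get?_empty, Option.or_none]
  by_cases h : 0 ≤ k.1 ∧ k.1 < n ∧ k.1 < (lines.length : Int) ∧ 0 ≤ k.2.1 ∧ k.2.1 < m ∧
      k.2.1 < ((lines.getD k.1.toNat "").toList.length : Int)
  · rw [if_pos h, if_pos ⟨h.1, h.2.2.1, h.2.1, h.2.2.2.1, h.2.2.2.2.2, h.2.2.2.2.1⟩]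
  · rw [if_neg h, if_neg (by rintro ⟨a1, a2, a3, a4, a5, a6⟩; exact h ⟨a1, a3, a2, a4, a6, a5⟩)]

-- cellAt in terms of list indexing, on in-range indices
lemma cellAt_eq (lines : List String) {i j : Int} (h1 : 0 ≤ i) (h2 : i.toNat < lines.length)
    (h3 : 0 ≤ j) (h4 : j.toNat < (lines.getD i.toNat "").toList.length) :
    cellAt lines i j = (lines.getD i.toNat "").toList.getD j.toNat '?' := by
  have hi : i = ((i.toNat : Nat) : Int) := by omega
  have hj : j = ((j.toNat : Nat) : Int) := by omega
  rw [cellAt, cellRead?, hi, hj, PySem.List.pyGet?_natCast, List.getElem?_eq_getElem h2]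
  simp only [Option.bind_some, PySem.Str.pyGet?_natCast, Int.toNat_natCast]
  have hb' : j.toNat < lines[i.toNat].toList.length := by
    rwa [List.getD_eq_getElem _ _ h2] at h4
  rw [List.getD_eq_getElem _ _ h2, List.getD_eq_getElem _ _ hb', List.getElem?_eq_getElem hb']
  rfl

lemma good_cell {lines : List String} {n m : Int} (G : GoodGrid lines n m) {i j : Int}
    (h1 : 0 ≤ i) (h2 : i < n) (h3 : 0 ≤ j) (h4 : j < m) :
    cellAt lines i j ∈ validChars ∧
    ∀ e ∈ connOf (cellAt lines i j),
      0 ≤ i + e.1 ∧ i + e.1 < n ∧ 0 ≤ j + e.2 ∧ j + e.2 < m := by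
  obtain ⟨hn, hm, H⟩ := G
  have ha : i.toNat < lines.length := by omega
  obtain ⟨hrow, H2⟩ := H i.toNat ha
  have hb : j.toNat < (lines.getD i.toNat "").toList.length := by omega
  obtain ⟨hv, hc⟩ := H2 j.toNat hb
  have hcell : cellAt lines i j = (lines.getD i.toNat "").toList.getD j.toNat '?' :=
    cellAt_eq lines h1 ha h3 hb
  rw [hcell]
  refine ⟨hv, ?_⟩
  intro e he
  have := hc e he
  have hit : (i.toNat : Int) = i := by omega
  have hjt : (j.toNat : Int) = j := by omega
  rw [hit, hjt] at this
  exact this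

-- the compiled automaton read back through cellAt, under GoodGrid
lemma goodB_mem {lines : List String} {n m : Int} (G : GoodGrid lines n m) {i j : Int}
    (h1 : 0 ≤ i) (h2 : i < n) (h3 : 0 ≤ j) (h4 : j < m) :
    ((i, j) ∈ (compileB lines n m).1) ↔ cellAt lines i j = 'S' := by
  obtain ⟨hn, hm, H⟩ := G
  have ha : i.toNat < lines.length := by omega
  have hrow := (H i.toNat ha).1
  have hb : j.toNat < (lines.getD i.toNat "").toList.length := by omega
  rw [compileB_fst_mem, cellAt_eq lines h1 ha h3 hb]
  constructor
  · rintro ⟨-, -, -, -, -, -, hS⟩; exact hS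
  · intro hS
    exact ⟨h1, h2, by omega, h3, h4, by simpa using (by omega : j < ((lines.getD i.toNat "").toList.length : Int)), hS⟩

lemma goodB_get? {lines : List String} {n m : Int} (G : GoodGrid lines n m) {i j : Int} (d : Int)
    (h1 : 0 ≤ i) (h2 : i < n) (h3 : 0 ≤ j) (h4 : j < m) :
    ((compileB lines n m).2).get? (i, j, d) = cellTrans n m i j (cellAt lines i j) d := by
  obtain ⟨hn, hm, H⟩ := G
  have ha : i.toNat < lines.length := by omega
  have hrow := (H i.toNat ha).1
  have hb : j.toNat < (lines.getD i.toNat "").toList.length := by omega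
  rw [compileB_snd_get?, cellAt_eq lines h1 ha h3 hb]
  rw [if_pos ⟨h1, h2, (by omega : i < (lines.length : Int)), h3, h4,
    (by omega : j < ((lines.getD i.toNat "").toList.length : Int))⟩]

lemma slotOf_mem {t : Int × Int} {s : Nat} (h : slotOf t = (s : Int)) (hs : s < 4) :
    t = dirsB.getD s (0, 0) := by
  unfold slotOf at h
  rcases hidx : PySem.List.index? dirsB t with _ | k
  · rw [hidx] at h; simp at h; omega
  · rw [hidx] at h
    obtain ⟨hklt, hgl, -⟩ := PySem.List.getElem_of_index?_eq_some hidx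
    have hks : k = s := by simpa using h
    subst hks
    rw [List.getD_eq_getElem _ _ hklt]
    exact hgl.symm

-- per-glyph shape of cellTrans (entry slot → exit slot)
lemma cellTrans_bar (n m i j : Int) (d : Int) :
    cellTrans n m i j '|' d = if d = 0 then exitOpt n m i j 0 else if d = 1 then exitOpt n m i j 1 else none := by
  simp [cellTrans, endsB, oppB]

lemma cellTrans_dash (n m i j : Int) (d : Int) :
    cellTrans n m i j '-' d = if d = 2 then exitOpt n m i j 2 else if d = 3 then exitOpt n m i j 3 else none := by
  simp [cellTrans, endsB, oppB]

lemma cellTrans_L (n m i j : Int) (d : Int) :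
    cellTrans n m i j 'L' d = if d = 1 then exitOpt n m i j 3 else if d = 2 then exitOpt n m i j 0 else none := by
  simp [cellTrans, endsB, oppB]

lemma cellTrans_J (n m i j : Int) (d : Int) :
    cellTrans n m i j 'J' d = if d = 1 then exitOpt n m i j 2 else if d = 3 then exitOpt n m i j 0 else none := by
  simp [cellTrans, endsB, oppB]

lemma cellTrans_7 (n m i j : Int) (d : Int) :
    cellTrans n m i j '7' d = if d = 0 then exitOpt n m i j 2 else if d = 3 then exitOpt n m i j 1 else none := by
  simp [cellTrans, endsB, oppB]

lemma cellTrans_F (n m i j : Int) (d : Int) :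
    cellTrans n m i j 'F' d = if d = 0 then exitOpt n m i j 3 else if d = 2 then exitOpt n m i j 1 else none := by
  simp [cellTrans, endsB, oppB]

lemma pipe_go (lines : List String) (n m : Int) (k : Nat)
    (ih : ∀ (prev cur : Int × Int) (steps : Int), 0 ≤ cur.1 → cur.1 < n → 0 ≤ cur.2 → cur.2 < m →
      loopA lines n m k prev cur steps =
        loopB (compileB lines n m).1 (compileB lines n m).2 k
          (cur.1, cur.2, slotOf (cur.1 - prev.1, cur.2 - prev.2)) steps)
    (prev cur : Int × Int) (steps : Int) (c : Char) (e1 e2 : Int × Int) (s1 t1 s2 t2 : Nat)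
    (hca : cellAt lines cur.1 cur.2 = c) (hS : c ≠ 'S')
    (hp : PySem.Dict.get? pipesDict c = some [e1, e2])
    (hct : ∀ d : Int, cellTrans n m cur.1 cur.2 c d =
      if d = (s1 : Int) then exitOpt n m cur.1 cur.2 t1
      else if d = (s2 : Int) then exitOpt n m cur.1 cur.2 t2 else none)
    (hs1 : slotOf (-e1.1, -e1.2) = (s1 : Int)) (hs2 : slotOf (-e2.1, -e2.2) = (s2 : Int))
    (hs1lt : s1 < 4) (hs2lt : s2 < 4)
    (hd1 : dirsB.getD s1 (0, 0) = (-e1.1, -e1.2)) (hd2 : dirsB.getD s2 (0, 0) = (-e2.1, -e2.2))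
    (hdt1 : dirsB.getD t1 (0, 0) = e2) (hdt2 : dirsB.getD t2 (0, 0) = e1)
    (hv1 : slotOf e2 = (t1 : Int)) (hv2 : slotOf e1 = (t2 : Int))
    (hne : (s1 : Int) ≠ (s2 : Int))
    (hmemS : ((cur.1, cur.2) : Int × Int) ∉ (compileB lines n m).1)
    (htr : ∀ d : Int, ((compileB lines n m).2).get? (cur.1, cur.2, d) =
      cellTrans n m cur.1 cur.2 c d)
    (h1 : 0 ≤ cur.1) (h2 : cur.1 < n) (h3 : 0 ≤ cur.2) (h4 : cur.2 < m)
    (hb1 : 0 ≤ cur.1 + e1.1 ∧ cur.1 + e1.1 < n ∧ 0 ≤ cur.2 + e1.2 ∧ cur.2 + e1.2 < m)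
    (hb2 : 0 ≤ cur.1 + e2.1 ∧ cur.1 + e2.1 < n ∧ 0 ≤ cur.2 + e2.2 ∧ cur.2 + e2.2 < m) :
    loopA lines n m (k + 1) prev cur steps =
      loopB (compileB lines n m).1 (compileB lines n m).2 (k + 1)
        (cur.1, cur.2, slotOf (cur.1 - prev.1, cur.2 - prev.2)) steps := by
  have hoob : ¬(cur.1 < 0 ∨ n ≤ cur.1 ∨ cur.2 < 0 ∨ m ≤ cur.2) := by omega
  have hdot : cellAt lines cur.1 cur.2 ≠ '.' := by
    rw [hca]; intro h; rw [h] at hp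
    rw [(by decide : PySem.Dict.get? pipesDict '.' = none)] at hp; cases hp
  have hA : getNextStep lines prev cur n m =
      (if prev = (cur.1 + e1.1, cur.2 + e1.2) then (cur.1 + e2.1, cur.2 + e2.2)
       else if prev = (cur.1 + e2.1, cur.2 + e2.2) then (cur.1 + e1.1, cur.2 + e1.2)
       else (-1, -1)) := by
    unfold getNextStep
    rw [if_neg hoob, if_neg hdot, hca, hp]
    rfl
  have hcf : PySem.Set.contains (compileB lines n m).1 (cur.1, cur.2) = false := by
    rw [Bool.eq_false_iff]
    intro hb
    exact hmemS (by simpa [PySem.Set.contains_iff] using hb)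
  simp only [loopA, loopB, hca, hA, hcf, Bool.false_eq_true, if_false, ne_eq, hS,
    not_false_iff, if_true]
  rw [htr, hct]
  by_cases hc1 : prev = (cur.1 + e1.1, cur.2 + e1.2)
  · have hdir : ((cur.1 - prev.1, cur.2 - prev.2) : Int × Int) = (-e1.1, -e1.2) := by
      rw [hc1, Prod.ext_iff]; constructor <;> simp
    rw [hdir, hs1, if_pos rfl, if_pos hc1]
    have hnz : ¬(((cur.1 + e2.1, cur.2 + e2.2) : Int × Int) = (-1, -1)) := by
      intro h; rw [Prod.ext_iff] at h; simp at h; omega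
    rw [if_neg hnz]
    unfold exitOpt
    rw [hdt1, if_pos hb2]
    have hih := ih cur (cur.1 + e2.1, cur.2 + e2.2) (steps + 1) (by omega) (by omega) (by omega) (by omega)
    simp only [add_sub_cancel_left] at hih
    rw [hih, hv1]
  · by_cases hc2 : prev = (cur.1 + e2.1, cur.2 + e2.2)
    · have hdir : ((cur.1 - prev.1, cur.2 - prev.2) : Int × Int) = (-e2.1, -e2.2) := by
        rw [hc2, Prod.ext_iff]; constructor <;> simp
      rw [hdir, hs2, if_neg hne.symm, if_pos rfl, if_neg hc1, if_pos hc2]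
      have hnz : ¬(((cur.1 + e1.1, cur.2 + e1.2) : Int × Int) = (-1, -1)) := by
        intro h; rw [Prod.ext_iff] at h; simp at h; omega
      rw [if_neg hnz]
      unfold exitOpt
      rw [hdt2, if_pos hb1]
      have hih := ih cur (cur.1 + e1.1, cur.2 + e1.2) (steps + 1) (by omega) (by omega) (by omega) (by omega)
      simp only [add_sub_cancel_left] at hih
      rw [hih, hv2]
    · have hd1' : slotOf (cur.1 - prev.1, cur.2 - prev.2) ≠ (s1 : Int) := by
        intro h
        have := slotOf_mem h hs1lt
        rw [hd1, Prod.ext_iff] at this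
        exact hc1 (by rw [Prod.ext_iff]; simp at this ⊢; omega)
      have hd2' : slotOf (cur.1 - prev.1, cur.2 - prev.2) ≠ (s2 : Int) := by
        intro h
        have := slotOf_mem h hs2lt
        rw [hd2, Prod.ext_iff] at this
        exact hc2 (by rw [Prod.ext_iff]; simp at this ⊢; omega)
      rw [if_neg hd1', if_neg hd2', if_neg hc1, if_neg hc2, if_pos rfl]

lemma loop_eq (lines : List String) (n m : Int) (G : GoodGrid lines n m) :
    ∀ (fuel : Nat) (prev cur : Int × Int) (steps : Int),
      0 ≤ cur.1 → cur.1 < n → 0 ≤ cur.2 → cur.2 < m →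
      loopA lines n m fuel prev cur steps =
        loopB (compileB lines n m).1 (compileB lines n m).2 fuel
          (cur.1, cur.2, slotOf (cur.1 - prev.1, cur.2 - prev.2)) steps := by
  intro fuel
  induction fuel with
  | zero => intro prev cur steps _ _ _ _; rfl
  | succ k ih =>
    intro prev cur steps h1 h2 h3 h4
    obtain ⟨hv, hconn⟩ := good_cell G h1 h2 h3 h4
    have hmem := goodB_mem G h1 h2 h3 h4
    have htr : ∀ d : Int, ((compileB lines n m).2).get? (cur.1, cur.2, d) =
        cellTrans n m cur.1 cur.2 (cellAt lines cur.1 cur.2) d :=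
      fun d => goodB_get? G d h1 h2 h3 h4
    simp only [validChars, List.mem_cons, List.not_mem_nil, or_false] at hv
    rcases hv with h | h | h | h | h | h | h | h
    all_goals (try (rw [h] at hconn htr hmem))
    · exact pipe_go lines n m k ih prev cur steps '|' (1, 0) (-1, 0) 0 0 1 1 h (by decide)
        (by decide) (fun d => by rw [cellTrans_bar]; norm_num) (by decide) (by decide)
        (by decide) (by decide) (by decide) (by decide) (by decide) (by decide)
        (by decide) (by decide) (by decide)
        (fun hm => absurd (hmem.mp hm) (by decide)) htr h1 h2 h3 h4
        (hconn (1, 0) (by decide)) (hconn (-1, 0) (by decide))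
    · exact pipe_go lines n m k ih prev cur steps '-' (0, 1) (0, -1) 2 2 3 3 h (by decide)
        (by decide) (fun d => by rw [cellTrans_dash]; norm_num) (by decide) (by decide)
        (by decide) (by decide) (by decide) (by decide) (by decide) (by decide)
        (by decide) (by decide) (by decide)
        (fun hm => absurd (hmem.mp hm) (by decide)) htr h1 h2 h3 h4
        (hconn (0, 1) (by decide)) (hconn (0, -1) (by decide))
    · exact pipe_go lines n m k ih prev cur steps 'L' (-1, 0) (0, 1) 1 3 2 0 h (by decide)
        (by decide) (fun d => by rw [cellTrans_L]; norm_num) (by decide) (by decide)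
        (by decide) (by decide) (by decide) (by decide) (by decide) (by decide)
        (by decide) (by decide) (by decide)
        (fun hm => absurd (hmem.mp hm) (by decide)) htr h1 h2 h3 h4
        (hconn (-1, 0) (by decide)) (hconn (0, 1) (by decide))
    · exact pipe_go lines n m k ih prev cur steps 'J' (-1, 0) (0, -1) 1 2 3 0 h (by decide)
        (by decide) (fun d => by rw [cellTrans_J]; norm_num) (by decide) (by decide)
        (by decide) (by decide) (by decide) (by decide) (by decide) (by decide)
        (by decide) (by decide) (by decide)
        (fun hm => absurd (hmem.mp hm) (by decide)) htr h1 h2 h3 h4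
        (hconn (-1, 0) (by decide)) (hconn (0, -1) (by decide))
    · exact pipe_go lines n m k ih prev cur steps '7' (1, 0) (0, -1) 0 2 3 1 h (by decide)
        (by decide) (fun d => by rw [cellTrans_7]; norm_num) (by decide) (by decide)
        (by decide) (by decide) (by decide) (by decide) (by decide) (by decide)
        (by decide) (by decide) (by decide)
        (fun hm => absurd (hmem.mp hm) (by decide)) htr h1 h2 h3 h4
        (hconn (1, 0) (by decide)) (hconn (0, -1) (by decide))
    · exact pipe_go lines n m k ih prev cur steps 'F' (1, 0) (0, 1) 0 3 2 1 h (by decide)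
        (by decide) (fun d => by rw [cellTrans_F]; norm_num) (by decide) (by decide)
        (by decide) (by decide) (by decide) (by decide) (by decide) (by decide)
        (by decide) (by decide) (by decide)
        (fun hm => absurd (hmem.mp hm) (by decide)) htr h1 h2 h3 h4
        (hconn (1, 0) (by decide)) (hconn (0, 1) (by decide))
    · -- '.' : the walk dies on both sides
      have hcf : PySem.Set.contains (compileB lines n m).1 (cur.1, cur.2) = false := by
        rw [Bool.eq_false_iff]
        intro hb
        exact absurd (hmem.mp (by simpa [PySem.Set.contains_iff] using hb)) (by decide)
      have hnext : getNextStep lines prev cur n m = (-1, -1) := by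
        unfold getNextStep
        rw [if_neg (by omega), if_pos h]
      have hget : ((compileB lines n m).2).get?
          (cur.1, cur.2, slotOf (cur.1 - prev.1, cur.2 - prev.2)) = none := by
        rw [htr]; simp [cellTrans, endsB]
      simp only [loopA, loopB, hnext, hcf, hget, h, Bool.false_eq_true, if_false]
      rw [if_pos (by decide)]
      simp
    · -- 'S' : both sides stop
      have hctr : PySem.Set.contains (compileB lines n m).1 (cur.1, cur.2) = true := by
        simpa [PySem.Set.contains_iff] using hmem.mpr rfl
      simp only [loopA, loopB, h, hctr, if_true]
      rw [if_neg (by simp)]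

-- cellRead? = some unpacked into list-level facts
lemma cellRead?_facts {lines : List String} {y x : Int} {ch : Char} (h0 : 0 ≤ y) (h0' : 0 ≤ x)
    (h : cellRead? lines y x = some ch) :
    y.toNat < lines.length ∧ x.toNat < (lines.getD y.toNat "").toList.length ∧
    (lines.getD y.toNat "").toList.getD x.toNat '?' = ch := by
  rw [cellRead?, PySem.List.pyGet?_of_nonneg _ h0] at h
  rcases hr : lines[y.toNat]? with _ | row
  · rw [hr] at h; cases h
  · rw [hr] at h
    simp only [Option.bind_some] at h
    have hx : PySem.List.pyGet? row.toList x = some ch := by simpa using h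
    rw [PySem.List.pyGet?_of_nonneg _ h0'] at hx
    have hlen : y.toNat < lines.length := by
      by_contra hcon
      rw [List.getElem?_eq_none (by omega)] at hr; cases hr
    have hrow : lines.getD y.toNat "" = row := by
      rw [List.getD_eq_getElem?_getD, hr]; rfl
    rw [hrow]
    rcases List.getElem?_eq_some_iff.mp hx with ⟨hlt, hval⟩
    exact ⟨hlen, hlt, by rw [List.getD_eq_getElem _ _ hlt]; exact hval⟩

-- ===== VERDICT (by name: the statement is the Claim_ definition above) =====
theorem getCycleLength_spec : Claim_equal_getCycleLength := by
  intro lines startPos direction n m _ hpre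
  unfold Spec_getCycleLength getCycleLength getCycleLength_alt
  simp only []
  obtain ⟨k, hk⟩ : ∃ k, pvFuel n m = k + 1 := ⟨pvFuel n m - 1, by unfold pvFuel; omega⟩
  by_cases hoob : startPos.1 + direction.1 < 0 ∨ n ≤ startPos.1 + direction.1 ∨
      startPos.2 + direction.2 < 0 ∨ m ≤ startPos.2 + direction.2
  · rw [if_pos hoob, if_pos (by omega)]
  · rw [if_neg hoob, if_neg (show ¬¬(0 ≤ startPos.1 + direction.1 ∧ startPos.1 + direction.1 < n ∧
      0 ≤ startPos.2 + direction.2 ∧ startPos.2 + direction.2 < m) by omega)]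
    rcases hpre with h | ⟨hb1, hb2, hb3, hb4, hcell⟩ | ⟨G, hs1, hs2, hs3, hs4, hcS⟩
    · exact absurd h hoob
    · rw [hk]
      rcases hcell with hc | hc
      · -- first cell is '.': both return -1 at once
        obtain ⟨hl1, hl2, hl3⟩ := cellRead?_facts (by omega : (0:Int) ≤ startPos.1 + direction.1)
          (by omega : (0:Int) ≤ startPos.2 + direction.2) hc
        have hca : cellAt lines (startPos.1 + direction.1) (startPos.2 + direction.2) = '.' := by
          rw [cellAt_eq lines (by omega) hl1 (by omega) hl2, hl3]
        have hcf : PySem.Set.contains (compileB lines n m).1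
            (startPos.1 + direction.1, startPos.2 + direction.2) = false := by
          rw [Bool.eq_false_iff]
          intro hb
          have hm2 := (compileB_fst_mem lines n m _).mp
            (by simpa [PySem.Set.contains_iff] using hb)
          simp only at hm2
          rw [hl3] at hm2
          exact absurd hm2.2.2.2.2.2.2 (by decide)
        have hget : ((compileB lines n m).2).get?
            (startPos.1 + direction.1, startPos.2 + direction.2, slotOf direction) = none := by
          rw [compileB_snd_get?]
          simp only
          rw [if_pos ⟨by omega, hb2, by omega, by omega, hb4, by omega⟩, hl3]
          simp [cellTrans, endsB]
        have hnext : getNextStep lines startPos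
            (startPos.1 + direction.1, startPos.2 + direction.2) n m = (-1, -1) := by
          unfold getNextStep
          rw [if_neg (show ¬(startPos.1 + direction.1 < 0 ∨ n ≤ startPos.1 + direction.1 ∨
            startPos.2 + direction.2 < 0 ∨ m ≤ startPos.2 + direction.2) from by omega),
            if_pos (show cellAt lines (startPos.1 + direction.1) (startPos.2 + direction.2) = '.' from hca)]
        simp only [loopA, loopB, hcf, hget, hnext, Bool.false_eq_true, if_false]
        rw [if_pos (show cellAt lines (startPos.1 + direction.1) (startPos.2 + direction.2) ≠ 'S' from by rw [hca]; decide)]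
        simp
      · -- first cell is 'S': both return 1 at once
        obtain ⟨hl1, hl2, hl3⟩ := cellRead?_facts (by omega : (0:Int) ≤ startPos.1 + direction.1)
          (by omega : (0:Int) ≤ startPos.2 + direction.2) hc
        have hca : cellAt lines (startPos.1 + direction.1) (startPos.2 + direction.2) = 'S' := by
          rw [cellAt_eq lines (by omega) hl1 (by omega) hl2, hl3]
        have hctr : PySem.Set.contains (compileB lines n m).1
            (startPos.1 + direction.1, startPos.2 + direction.2) = true := by
          have : ((startPos.1 + direction.1, startPos.2 + direction.2) : Int × Int) ∈
              (compileB lines n m).1 := by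
            rw [compileB_fst_mem]
            exact ⟨by simp only; omega, by simp only; omega, by simp only; omega,
              by simp only; omega, by simp only; omega, by simpa using (by omega :
                (startPos.2 + direction.2) < ((lines.getD (startPos.1 + direction.1).toNat "").toList.length : Int)), hl3⟩
          simpa [PySem.Set.contains_iff] using this
        simp only [loopA, loopB, hctr, if_true]
        rw [if_neg (by simp [hca])]
    · have hgl := loop_eq lines n m G (pvFuel n m) startPos
        (startPos.1 + direction.1, startPos.2 + direction.2) 1
        (by omega) (by omega) (by omega) (by omega)
      simp only [add_sub_cancel_left] at hgl
      exact hgl
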